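-- pv_equiv track=rewrite | github.com/BerriAI/litellm | litellm/llms/mini_agent.py | _expand_shell_prefixes
-- ===== SOURCE A (Python) =====
-- from typing import Tuple, List, Dict, Any
--
-- LANGUAGE_PREFIXES = {
--     "python": ("python", "python3"),
--     "rust": ("cargo", "rustc"),
--     "go": ("go",),
--     "bash": ("bash", "sh"),
--     "shell": ("sh", "bash"),
--     "javascript": ("node", "npm", "npx"),
--     "typescript": ("ts-node", "npx ts-node"),
--     "deno": ("deno",),
-- }
--
-- def _expand_shell_prefixes(languages: Tuple[str, ...]) -> Tuple[str, ...]: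
--     prefixes: List[str] = []
--     def _add_prefix(value: str) -> None:
--         token = value.strip()
--         if not token:
--             return
--         if token not in prefixes:
--             prefixes.append(token)
--
--     for lang in languages:
--         mapping = LANGUAGE_PREFIXES.get(lang, (lang,))
--         if isinstance(mapping, str):
--             mapping = (mapping,)
--         for prefix in mapping:
--             _add_prefix(prefix)
--     # Always allow echo for trivial smoke tests / readiness probes
--     _add_prefix("echo")
--     return tuple(prefixes)
-- ===== SOURCE B (Python) =====
-- from typing import Tuple
--
-- LANGUAGE_PREFIXES = {
--     "python": ("python", "python3"),
--     "rust": ("cargo", "rustc"),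
--     "go": ("go",),
--     "bash": ("bash", "sh"),
--     "shell": ("sh", "bash"),
--     "javascript": ("node", "npm", "npx"),
--     "typescript": ("ts-node", "npx ts-node"),
--     "deno": ("deno",),
-- }
--
-- def _expand_shell_prefixes(languages: Tuple[str, ...]) -> Tuple[str, ...]:
--     # Stage 1: flatten all candidate tokens (stripped, empties dropped), "echo" last.
--     pending = [t.strip() for lang in languages for t in LANGUAGE_PREFIXES.get(lang, (lang,))]
--     pending.append("echo")
--     pending = [t for t in pending if t]
--     # Stage 2: selection-style dedup with NO membership test anywhere:
--     # emit the head, then purge every later copy of it from the pending list.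
--     out = []
--     while pending:
--         head = pending[0]
--         out.append(head)
--         pending = [t for t in pending[1:] if t != head]
--     return tuple(out)
-- ===== Notes on version B (the rewrite author's own statement) =====
-- stated objective: alternative
-- what changed: Two staged passes replace A's single incremental loop: first flatten all stripped non-empty candidate tokens (echo appended), then dedup by repeated head-selection - emit the head and purge its later copies from the pending list - so no membership test against the output ever happens.
import Mathlib
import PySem

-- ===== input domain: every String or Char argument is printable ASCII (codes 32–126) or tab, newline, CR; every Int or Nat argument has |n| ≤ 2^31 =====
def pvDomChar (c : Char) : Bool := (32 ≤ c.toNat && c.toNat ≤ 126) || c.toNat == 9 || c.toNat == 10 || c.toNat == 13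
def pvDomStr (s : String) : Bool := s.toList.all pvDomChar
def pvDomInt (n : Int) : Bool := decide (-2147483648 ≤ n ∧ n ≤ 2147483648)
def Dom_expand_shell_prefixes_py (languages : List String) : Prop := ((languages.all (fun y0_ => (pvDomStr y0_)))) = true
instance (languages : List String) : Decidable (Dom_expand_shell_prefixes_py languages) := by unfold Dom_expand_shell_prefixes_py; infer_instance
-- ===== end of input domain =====

-- B replaces A's incremental membership-checked accumulator by two staged passes:
-- flatten all stripped non-empty tokens (echo last), then dedup by repeated
-- head-selection (emit head, purge its later copies) — an alternative decomposition.

-- ===== PORT A =====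
-- the module constant LANGUAGE_PREFIXES (shared by both ports)
def pvLANGUAGE_PREFIXES : PySem.Dict String (List String) :=
  PySem.Dict.ofList [
    ("python", ["python", "python3"]),
    ("rust", ["cargo", "rustc"]),
    ("go", ["go"]),
    ("bash", ["bash", "sh"]),
    ("shell", ["sh", "bash"]),
    ("javascript", ["node", "npm", "npx"]),
    ("typescript", ["ts-node", "npx ts-node"]),
    ("deno", ["deno"])]

-- LANGUAGE_PREFIXES.get(lang, (lang,))  (every value is a tuple, never a str,
-- so A's isinstance(mapping, str) branch never fires)
def pvLangMapping (lang : String) : List String :=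
  PySem.Dict.getD pvLANGUAGE_PREFIXES lang [lang]

-- A's inner helper _add_prefix
def pvAddPrefix (prefixes : List String) (value : String) : List String :=
  let token := PySem.Str.strip value
  if token = "" then prefixes
  else if token ∈ prefixes then prefixes
  else prefixes ++ [token]

def expand_shell_prefixes_py (languages : List String) : List String :=
  let prefixes := languages.foldl (fun acc lang => (pvLangMapping lang).foldl pvAddPrefix acc) []
  pvAddPrefix prefixes "echo"

-- ===== PORT B =====
-- B's stage-2 loop: while pending: emit head, purge its later copies
def pvNub (pending : List String) : List String :=
  match pending with
  | [] => []
  | head :: rest => head :: pvNub (rest.filter (fun t => t != head))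
termination_by pending.length
decreasing_by
  simp only [List.length_cons, List.length_unattach]
  exact Nat.lt_succ_of_le (le_trans (List.length_filter_le _ _) (by simp))

def expand_shell_prefixes_py_alt (languages : List String) : List String :=
  let pending := (languages.flatMap (fun lang => (pvLangMapping lang).map PySem.Str.strip)) ++ ["echo"]
  pvNub (pending.filter (fun t => t != ""))

-- ===== PRECONDITION & SPEC =====
def Spec_expand_shell_prefixes_py (languages : List String) (out : List String) : Prop := out = expand_shell_prefixes_py_alt languages
instance (languages : List String) (out : List String) : Decidable (Spec_expand_shell_prefixes_py languages out) := by unfold Spec_expand_shell_prefixes_py; infer_instance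

-- ===== CLAIM (what is proved, stated in full; the proofs are below) =====
def Claim_equal_expand_shell_prefixes_py : Prop := ∀ (languages : List String), Dom_expand_shell_prefixes_py languages → Spec_expand_shell_prefixes_py languages (expand_shell_prefixes_py languages)

-- ===== LEMMAS AND PROOFS =====

-- ofList commutes with filter
theorem pv_ofList_filter (p : String → Bool) (xs : List String) :
    PySem.Set.ofList (xs.filter p) = (PySem.Set.ofList xs).filter p := by
  induction xs with
  | nil => rfl
  | cons x xs ih =>
    rw [List.filter_cons, PySem.Set.ofList_cons, List.filter_cons]
    by_cases h : p x = true
    · rw [if_pos h, if_pos h, PySem.Set.ofList_cons, ih]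
      simp [PySem.Set.discard, List.filter_filter, Bool.and_comm]
    · simp only [Bool.not_eq_true] at h
      rw [if_neg (by simp [h]), if_neg (by simp [h]), ih, PySem.Set.discard,
        List.filter_filter]
      congr 1
      funext y
      by_cases hyx : y = x
      · subst hyx; simp [h]
      · simp [hyx]

-- B's head-selection loop computes first-occurrence dedup, i.e. set-of-list
theorem pv_nub_eq_ofList (ts : List String) : pvNub ts = PySem.Set.ofList ts := by
  induction hn : ts.length using Nat.strong_induction_on generalizing ts with
  | _ n ih =>
    match ts with
    | [] => simp [pvNub, PySem.Set.ofList_nil]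
    | t :: rest =>
      rw [pvNub, PySem.Set.ofList_cons]
      have hlen : (rest.filter (fun x => x != t)).length < n := by
        subst hn
        exact Nat.lt_succ_of_le (List.length_filter_le _ _)
      rw [ih _ hlen _ rfl, pv_ofList_filter, PySem.Set.discard]
      rfl

-- A's fold with _add_prefix over raw tokens is Set.update over the stripped non-empty ones.
theorem pv_foldl_addPrefix (ts : List String) : ∀ (acc : List String),
    ts.foldl pvAddPrefix acc
      = PySem.Set.update acc ((ts.map PySem.Str.strip).filter (fun t => t != "")) := by
  induction ts with
  | nil => intro acc; simp [PySem.Set.update]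
  | cons t ts ih =>
    intro acc
    by_cases h : PySem.Str.strip t = ""
    · simp [List.foldl, pvAddPrefix, h, ih]
    · simp only [List.foldl, List.map, List.filter]
      have hb : (PySem.Str.strip t != "") = true := by simp [h]
      rw [hb]
      rw [ih, PySem.Set.update_cons]
      congr 1
      simp [pvAddPrefix, h, PySem.Set.add_eq_ite]

-- A's nested loop over languages is a single fold over the flattened token list.
theorem pv_nested_eq_flat (languages : List String) : ∀ (acc : List String),
    languages.foldl (fun acc lang => (pvLangMapping lang).foldl pvAddPrefix acc) acc
      = (languages.flatMap pvLangMapping).foldl pvAddPrefix acc := by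
  induction languages with
  | nil => intro acc; simp
  | cons l ls ih => intro acc; simp [List.foldl, List.flatMap_cons, List.foldl_append, ih]

theorem expand_shell_prefixes_py_spec : Claim_equal_expand_shell_prefixes_py := by
  intro languages _
  unfold Spec_expand_shell_prefixes_py expand_shell_prefixes_py expand_shell_prefixes_py_alt
  rw [pv_nub_eq_ofList, ← PySem.Set.update_nil_left]
  have hflat : languages.flatMap (fun lang => (pvLangMapping lang).map PySem.Str.strip)
      = (languages.flatMap pvLangMapping).map PySem.Str.strip := by
    simp [List.map_flatMap]
  rw [hflat]
  have hAdd : pvAddPrefix (languages.foldl (fun acc lang => (pvLangMapping lang).foldl pvAddPrefix acc) []) "echo"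
      = (languages.flatMap pvLangMapping ++ ["echo"]).foldl pvAddPrefix [] := by
    rw [List.foldl_append, pv_nested_eq_flat]
    rfl
  rw [hAdd, pv_foldl_addPrefix]
  have : PySem.Str.strip "echo" = "echo" := by decide
  simp [this, List.filter_append]
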